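-- pv_equiv track=rewrite | github.com/renaudbmg/programmation_1A | TD1/main.py | highest_score_dif
-- ===== SOURCE A (Python) =====
-- points = {'a' : 1, 'e' : 1,'i' : 1,'l' : 1,'n' : 1,'o' : 1,'r' : 1,'s' : 1,'t' : 1,'u' : 1,'d' : 2,'g' : 2,'m' : 2,'b' : 3,'c' : 3,'p' : 3,'f' : 4,'h' : 4,'v' : 4,'j' : 8,'q' : 8,'k' : 10,'w' : 10,'x' : 10,'y' : 10,'z' : 10}
--
-- def score(word):
--     score = 0
--     letter = list(word)
--     for letter in word:
--         score += points[letter]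
--     return score
--
-- def highest_score_dif(available_words, letters):
--     max = 0
--     max_score_words = []
--     for word in available_words:
--         letters_available = list(letters)
--         if score(word) >= max:
--             can_form = True
--             for letter in word:
--                 if letter not in letters_available:
--                     can_form = False
--                 else:
--                     letters_available.remove(letter)
--             if can_form and score(word) > max:
--                 max = score(word)
--                 max_score_words = [word]
--         elif can_form and score(word) == max:
--                 max_score_words.append(word)
--     return (max_score_words, score(max_score_words[0]))
-- ===== SOURCE B (Python) =====
-- points = {'a' : 1, 'e' : 1,'i' : 1,'l' : 1,'n' : 1,'o' : 1,'r' : 1,'s' : 1,'t' : 1,'u' : 1,'d' : 2,'g' : 2,'m' : 2,'b' : 3,'c' : 3,'p' : 3,'f' : 4,'h' : 4,'v' : 4,'j' : 8,'q' : 8,'k' : 10,'w' : 10,'x' : 10,'y' : 10,'z' : 10}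
--
-- def highest_score_dif(available_words, letters):
--     avail = {}
--     for c in letters:
--         avail[c] = avail.get(c, 0) + 1
--
--     def score(word):
--         return sum(points[c] for c in word)
--
--     def formable(word):
--         need = {}
--         for c in word:
--             need[c] = need.get(c, 0) + 1
--         return all(avail.get(c, 0) >= n for c, n in need.items())
--
--     candidates = [w for w in available_words if formable(w)]
--     best = max(candidates, key=score)
--     return ([best], score(best))
-- ===== Notes on version B (the rewrite author's own statement) =====
-- stated objective: simpler
-- what changed: A's single scan with a running max, a stale can_form flag, a dead elif-append branch and a per-word copy-and-list.remove formability loop is replaced by a filter of formable candidates (formability via letter-count dictionaries) followed by max(candidates, key=score); Pre_ excludes exactly the inputs where A raises (a word with a character outside a-z, or no nonempty formable word).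
import Mathlib
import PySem

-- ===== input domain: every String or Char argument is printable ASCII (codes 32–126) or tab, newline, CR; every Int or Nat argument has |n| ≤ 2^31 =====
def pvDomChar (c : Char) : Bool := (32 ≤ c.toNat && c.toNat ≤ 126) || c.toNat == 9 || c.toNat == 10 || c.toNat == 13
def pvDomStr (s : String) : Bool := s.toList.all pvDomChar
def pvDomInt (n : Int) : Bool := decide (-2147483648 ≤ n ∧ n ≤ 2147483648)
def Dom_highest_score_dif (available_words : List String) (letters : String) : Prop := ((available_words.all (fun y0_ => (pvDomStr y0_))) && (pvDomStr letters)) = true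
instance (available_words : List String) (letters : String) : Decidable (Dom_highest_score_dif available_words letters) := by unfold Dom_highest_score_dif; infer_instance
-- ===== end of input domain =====

-- B replaces A's stale-flag single scan by a filter of formable candidates (letter-count
-- dictionaries) followed by max(candidates, key=score); return values only are compared.

-- ===== PORT A =====
-- the module constant `points` (shared by both Python versions)
def points : PySem.Dict Char Int := PySem.Dict.ofList
  [('a',1),('e',1),('i',1),('l',1),('n',1),('o',1),('r',1),('s',1),('t',1),('u',1),
   ('d',2),('g',2),('m',2),('b',3),('c',3),('p',3),('f',4),('h',4),('v',4),
   ('j',8),('q',8),('k',10),('w',10),('x',10),('y',10),('z',10)]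

-- Python `score`: `points[letter]` raises KeyError on chars outside the table; Pre_ excludes those, getD 0 here
def pyScore (word : String) : Int :=
  word.toList.foldl (fun s c => s + points.getD c 0) 0

-- the body of A's `for word in available_words` loop; state = (max, max_score_words, can_form)
def hsdBody (letters : String) (st : Int × List String × Bool) (word : String) :
    Int × List String × Bool :=
  let mx := st.1; let msw := st.2.1; let can_form := st.2.2
  if pyScore word ≥ mx then
    let inner := word.toList.foldl
      (fun (p : List Char × Bool) letter =>
        if letter ∈ p.1 then (p.1.erase letter, p.2) else (p.1, false))
      (letters.toList, true)
    let can_form := inner.2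
    if can_form && pyScore word > mx then (pyScore word, [word], can_form)
    else (mx, msw, can_form)
  else if can_form && pyScore word = mx then (mx, msw ++ [word], can_form)
  else (mx, msw, can_form)

def highest_score_dif (available_words : List String) (letters : String) : List String × Int :=
  -- can_form starts unassigned in Python, but the first iteration always assigns it
  -- before the elif can read it, so the init value `true` is never read
  let r := available_words.foldl (hsdBody letters) (0, ([], true))
  -- max_score_words[0] raises IndexError when empty; Pre_ excludes that, headD "" here
  (r.2.1, pyScore (r.2.1.headD ""))

-- ===== PORT B =====
def scoreB (word : String) : Int := (word.toList.map (fun c => points.getD c 0)).sum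

-- the `d[c] = d.get(c, 0) + 1` counting loop of Source B
def counterB (s : List Char) : PySem.Dict Char Int :=
  s.foldl (fun d c => d.insert c (d.getD c 0 + 1)) PySem.Dict.empty

def formableB (avail : PySem.Dict Char Int) (word : String) : Bool :=
  (counterB word.toList).items.all (fun p => avail.getD p.1 0 ≥ p.2)

def highest_score_dif_alt (available_words : List String) (letters : String) : List String × Int :=
  let avail := counterB letters.toList
  let candidates := available_words.filter (formableB avail)
  -- max(candidates, key=score) raises ValueError on an empty list; Pre_ excludes that, ([], 0) here
  match PySem.List.max? candidates scoreB with
  | some best => ([best], scoreB best)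
  | none => ([], 0)

-- ===== PRECONDITION & SPEC =====
-- Pre_ excludes exactly where Python A raises: a word with a char outside 'a'..'z' (KeyError in
-- score), and inputs with no nonempty formable word (IndexError at max_score_words[0]).
def Pre_highest_score_dif (available_words : List String) (letters : String) : Prop :=
  (available_words.all (fun w => w.toList.all (fun c => 'a' ≤ c && c ≤ 'z')) = true) ∧
  (available_words.any (fun w => !w.toList.isEmpty &&
    w.toList.all (fun c => w.toList.count c ≤ letters.toList.count c)) = true)
instance (available_words : List String) (letters : String) : Decidable (Pre_highest_score_dif available_words letters) := by unfold Pre_highest_score_dif; infer_instance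

def pvWitness_highest_score_dif : List String × String := (["a"], "a")

def Spec_highest_score_dif (available_words : List String) (letters : String) (out : List String × Int) : Prop := out = highest_score_dif_alt available_words letters
instance (available_words : List String) (letters : String) (out : List String × Int) : Decidable (Spec_highest_score_dif available_words letters out) := by unfold Spec_highest_score_dif; infer_instance

-- ===== CLAIM (what is proved, stated in full; the proofs are below) =====
def Claim_equal_highest_score_dif : Prop := ∀ (available_words : List String) (letters : String), Dom_highest_score_dif available_words letters → Pre_highest_score_dif available_words letters → Spec_highest_score_dif available_words letters (highest_score_dif available_words letters)

-- ===== LEMMAS AND PROOFS =====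

-- A's greedy removal loop: the flag, once false, stays false
lemma greedy_false (chars : List Char) (la : List Char) :
    (chars.foldl (fun (p : List Char × Bool) letter =>
      if letter ∈ p.1 then (p.1.erase letter, p.2) else (p.1, false)) (la, false)).2 = false := by
  induction chars generalizing la with
  | nil => rfl
  | cons c rest ih =>
      simp only [List.foldl_cons]
      by_cases h : c ∈ la <;> simp [h, ih]

-- peeling one char off the multiset-containment condition
lemma count_erase_iff (c : Char) (rest la : List Char) (h : c ∈ la) :
    (∀ x ∈ rest, rest.count x ≤ (la.erase c).count x) ↔
    (∀ x ∈ c :: rest, (c :: rest).count x ≤ la.count x) := by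
  have hc : 1 ≤ la.count c := List.one_le_count_iff.mpr h
  constructor
  · intro hall x hx
    by_cases hxc : x = c
    · subst hxc
      have hrest : rest.count x ≤ la.count x - 1 := by
        by_cases hxr : x ∈ rest
        · have := hall x hxr
          rwa [List.count_erase_self] at this
        · simp [List.count_eq_zero_of_not_mem hxr]
      simp only [List.count_cons_self]
      omega
    · have hx' : x ∈ rest := by
        rcases List.mem_cons.mp hx with h' | h'
        · exact absurd h' hxc
        · exact h'
      have := hall x hx'
      rw [List.count_erase_of_ne hxc] at this
      rw [List.count_cons_of_ne (by exact fun h' => hxc h'.symm)]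
      exact this
  · intro hall x _
    by_cases hxc : x = c
    · subst hxc
      have := hall x (List.mem_cons_self ..)
      simp only [List.count_cons_self] at this
      rw [List.count_erase_self]
      omega
    · have := hall x (List.mem_cons.mpr (Or.inr ‹x ∈ rest›))
      rw [List.count_cons_of_ne (by exact fun h' => hxc h'.symm)] at this
      rwa [List.count_erase_of_ne hxc]

-- A's greedy removal succeeds iff the word's multiset of chars is contained in the letters'
lemma greedy_eq_count (chars : List Char) (la : List Char) :
    (chars.foldl (fun (p : List Char × Bool) letter =>
      if letter ∈ p.1 then (p.1.erase letter, p.2) else (p.1, false)) (la, true)).2 =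
    decide (∀ c ∈ chars, chars.count c ≤ la.count c) := by
  induction chars generalizing la with
  | nil => simp
  | cons c rest ih =>
      simp only [List.foldl_cons]
      by_cases h : c ∈ la
      · simp only [h, if_pos, ih]
        exact Bool.decide_congr (count_erase_iff c rest la h)
      · simp only [h, if_neg, not_false_iff, greedy_false]
        symm
        simp only [decide_eq_false_iff_not]
        intro hall
        have := hall c (List.mem_cons_self ..)
        have h0 : la.count c = 0 := List.count_eq_zero_of_not_mem h
        have h1 : 1 ≤ (c :: rest).count c := by simp
        omega

-- B's counter test is the same multiset-containment condition
lemma formableB_eq_count (ls : List Char) (w : String) :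
    formableB (counterB ls) w =
    decide (∀ c ∈ w.toList, w.toList.count c ≤ ls.count c) := by
  unfold formableB counterB
  rw [PySem.Dict.foldl_insert_getD_add_one_eq_counter,
      PySem.Dict.foldl_insert_getD_add_one_eq_counter]
  rw [PySem.Dict.items_counter, List.all_map]
  rw [Bool.eq_iff_iff]
  simp only [List.all_eq_true, Function.comp, PySem.Dict.getD_counter, decide_eq_true_eq]
  constructor
  · intro h c hc
    have := h c (by rw [PySem.Set.mem_ofList]; exact hc)
    exact_mod_cast this
  · intro h c hc
    rw [PySem.Set.mem_ofList] at hc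
    exact_mod_cast h c hc

-- pyScore is scoreB (the running-sum loop is the sum of the mapped list)
lemma pyScore_eq (w : String) : pyScore w = scoreB w := by
  unfold pyScore scoreB
  rw [PySem.List.foldl_add]
  simp

-- every lowercase letter scores at least 1
lemma char_eq_of_toNat (c d : Char) (h : c.toNat = d.toNat) : c = d := by
  apply Char.ext
  exact UInt32.toNat_inj.mp h

lemma mem_lower (c : Char) (h : ('a' ≤ c && c ≤ 'z') = true) :
    c ∈ "abcdefghijklmnopqrstuvwxyz".toList := by
  rw [Bool.and_eq_true, decide_eq_true_eq, decide_eq_true_eq] at h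
  obtain ⟨h1, h2⟩ := h
  rw [Char.le_def, UInt32.le_iff_toNat_le] at h1 h2
  have h1' : 97 ≤ c.toNat := h1
  have h2' : c.toNat ≤ 122 := h2
  have hmap : "abcdefghijklmnopqrstuvwxyz".toList.map Char.toNat
      = (List.range 26).map (fun n => 97 + n) := by decide
  have hmem : c.toNat ∈ "abcdefghijklmnopqrstuvwxyz".toList.map Char.toNat := by
    rw [hmap]
    simp only [List.mem_map, List.mem_range]
    exact ⟨c.toNat - 97, by omega, by omega⟩
  obtain ⟨d, hd, hdc⟩ := List.mem_map.mp hmem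
  rwa [char_eq_of_toNat d c hdc] at hd

def pointsMkList : List (Char × Int) :=
  [('a',1),('e',1),('i',1),('l',1),('n',1),('o',1),('r',1),('s',1),('t',1),('u',1),
   ('d',2),('g',2),('m',2),('b',3),('c',3),('p',3),('f',4),('h',4),('v',4),
   ('j',8),('q',8),('k',10),('w',10),('x',10),('y',10),('z',10)]

set_option maxHeartbeats 2000000 in
lemma points_mk : points = PySem.Dict.mk pointsMkList := by rfl

lemma points_getD_all_pos :
    (("abcdefghijklmnopqrstuvwxyz".toList).all
      (fun c => decide (1 ≤ (PySem.Dict.mk pointsMkList).getD c 0))) = true := by decide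

lemma points_getD_pos (c : Char) (h : ('a' ≤ c && c ≤ 'z') = true) : 1 ≤ points.getD c 0 := by
  rw [points_mk]
  have := List.all_eq_true.mp points_getD_all_pos c (mem_lower c h)
  exact decide_eq_true_eq.mp this

lemma scoreB_pos (w : String)
    (hlc : w.toList.all (fun c => 'a' ≤ c && c ≤ 'z') = true) (hne : w.toList ≠ []) :
    0 < scoreB w := by
  unfold scoreB
  have haux : ∀ l : List Char, (∀ c ∈ l, ('a' ≤ c && c ≤ 'z') = true) →
      (0:Int) ≤ (l.map (fun c => points.getD c 0)).sum := by
    intro l hl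
    induction l with
    | nil => simp
    | cons c rest ih =>
        have h1 := points_getD_pos c (hl c (List.mem_cons_self ..))
        have h2 := ih (fun x hx => hl x (List.mem_cons.mpr (Or.inr hx)))
        simp only [List.map_cons, List.sum_cons]
        omega
  rw [List.all_eq_true] at hlc
  cases hl : w.toList with
  | nil => exact absurd hl hne
  | cons c rest =>
      have h1 := points_getD_pos c (hlc c (by rw [hl]; exact List.mem_cons_self ..))
      have h2 := haux rest (fun x hx => hlc x (by rw [hl]; exact List.mem_cons.mpr (Or.inr hx)))
      simp only [List.map_cons, List.sum_cons]
      omega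

-- A's effective filter predicate (formable AND strictly beats the running max that starts at 0)
def pB (ls : List Char) (w : String) : Bool :=
  formableB (counterB ls) w && scoreB w > 0

-- the simple best-so-far step that A's loop reduces to
def stepG (ls : List Char) (st : Int × List String) (word : String) : Int × List String :=
  if formableB (counterB ls) word && scoreB word > st.1 then (scoreB word, [word]) else st

-- step 1: A's three-component fold, projected to (max, max_score_words), is the simple fold stepG;
-- the elif branch never changes the state (score < max there), and can_form feeds only itself
lemma foldA_proj (ws : List String) (letters : String) (mx : Int) (msw : List String) (cf : Bool) :
    ((ws.foldl (hsdBody letters) (mx, (msw, cf))).1,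
     (ws.foldl (hsdBody letters) (mx, (msw, cf))).2.1) =
    ws.foldl (stepG letters.toList) (mx, msw) := by
  induction ws generalizing mx msw cf with
  | nil => rfl
  | cons w rest ih =>
      simp only [List.foldl_cons]
      have hform : (w.toList.foldl
          (fun (p : List Char × Bool) letter =>
            if letter ∈ p.1 then (p.1.erase letter, p.2) else (p.1, false))
          (letters.toList, true)).2 = formableB (counterB letters.toList) w := by
        rw [greedy_eq_count, formableB_eq_count]
      rw [hsdBody]
      simp only [hform, pyScore_eq]
      by_cases hge : scoreB w ≥ mx
      · simp only [hge, if_pos]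
        by_cases hfire : (formableB (counterB letters.toList) w && scoreB w > mx) = true
        · simp only [hfire, if_pos]
          rw [ih, stepG]
          simp only [hfire, if_pos]
        · simp only [hfire, Bool.false_eq_true, if_neg, not_false_iff]
          rw [ih, stepG]
          simp only [Bool.not_eq_true] at hfire
          simp only [hfire, Bool.false_eq_true, if_neg, not_false_iff]
      · simp only [hge, if_neg, not_false_iff]
        have hlt : scoreB w < mx := lt_of_not_ge hge
        have hne : (cf && decide (scoreB w = mx)) = false := by
          simp only [Bool.and_eq_false_iff]
          right; simp only [decide_eq_false_iff_not]; omega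
        simp only [hne, Bool.false_eq_true, if_neg, not_false_iff]
        rw [ih, stepG]
        have : (formableB (counterB letters.toList) w && scoreB w > mx) = false := by
          simp only [Bool.and_eq_false_iff]; right
          simp only [decide_eq_false_iff_not]; omega
        simp only [this, Bool.false_eq_true, if_neg, not_false_iff]

-- state abstraction: an Option-valued best-so-far describes stepG's accumulator
def stO (o : Option String) : Int × List String :=
  match o with | none => (0, []) | some b => (scoreB b, [b])

-- Python's max(candidates, key=score) as its first-extremum fold
def mfold (o : Option String) (L : List String) : Option String :=
  L.foldl (fun acc x => match acc with
    | none => some x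
    | some m => if scoreB m < scoreB x then some x else some m) o

-- step 2: the simple fold stepG over all words is the first-extremum fold over the pB-filtered list
lemma foldg_eq_max (ws : List String) (ls : List Char) (o : Option String)
    (ho : ∀ b, o = some b → 0 < scoreB b) :
    ws.foldl (stepG ls) (stO o) = stO (mfold o (ws.filter (pB ls))) := by
  induction ws generalizing o with
  | nil => rfl
  | cons w rest ih =>
      simp only [List.foldl_cons, List.filter_cons]
      cases o with
      | none =>
          by_cases hp : pB ls w = true
          · have hf : formableB (counterB ls) w = true := by
              unfold pB at hp; exact (Bool.and_eq_true _ _ ▸ hp).1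
            have hs : 0 < scoreB w := by
              unfold pB at hp
              have := (Bool.and_eq_true _ _ ▸ hp).2
              simpa using this
            have hcond : (formableB (counterB ls) w && scoreB w > (stO none).1) = true := by
              simp only [stO, hf, Bool.true_and]
              simpa using hs
            rw [stepG]
            simp only [hcond, if_pos, hp, mfold, List.foldl_cons]
            have hst : (scoreB w, [w]) = stO (some w) := rfl
            rw [hst, ih]
            · rfl
            · intro b hb; cases hb; exact hs
          · have hcond : (formableB (counterB ls) w && scoreB w > (stO none).1) = false := by
              unfold pB at hp
              simp only [Bool.not_eq_true] at hp
              rcases Bool.and_eq_false_iff.mp hp with h | h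
              · simp [h]
              · simp only [stO, Bool.and_eq_false_iff]; right; simpa using h
            rw [stepG, hcond]
            simp only [Bool.false_eq_true, if_neg, not_false_iff, hp]
            exact ih none (by intro b hb; cases hb)
      | some b =>
          have hb : 0 < scoreB b := ho b rfl
          by_cases hgt : (formableB (counterB ls) w && scoreB w > (stO (some b)).1) = true
          · have hf : formableB (counterB ls) w = true := (Bool.and_eq_true _ _ ▸ hgt).1
            have hsw : scoreB b < scoreB w := by
              have := (Bool.and_eq_true _ _ ▸ hgt).2
              simpa [stO] using this
            have hp : pB ls w = true := by
              unfold pB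
              rw [Bool.and_eq_true]
              refine ⟨hf, by simpa using lt_trans hb hsw⟩
            rw [stepG]
            simp only [hgt, if_pos, hp, mfold, List.foldl_cons]
            have h2 : (if scoreB b < scoreB w then some w else some b) = some w := by
              simp [hsw]
            rw [h2]
            have hst : (scoreB w, [w]) = stO (some w) := rfl
            rw [hst, ih]
            · rfl
            · intro x hx; cases hx; exact lt_trans hb hsw
          · have hgt' : (formableB (counterB ls) w && scoreB w > (stO (some b)).1) = false := by
              simpa using hgt
            rw [stepG]
            simp only [hgt', Bool.false_eq_true, if_neg, not_false_iff]
            by_cases hp : pB ls w = true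
            · have hf : formableB (counterB ls) w = true := by
                unfold pB at hp; exact (Bool.and_eq_true _ _ ▸ hp).1
              have hsw : ¬ scoreB b < scoreB w := by
                intro hlt
                apply hgt
                simp only [stO, hf, Bool.true_and]
                simpa using hlt
              simp only [hp, if_pos, mfold, List.foldl_cons]
              have h2 : (if scoreB b < scoreB w then some w else some b) = some b := by
                simp [hsw]
              rw [h2]
              exact ih (some b) ho
            · simp only [hp, Bool.false_eq_true, if_neg, not_false_iff]
              exact ih (some b) ho

-- step 3a: with a strictly positive incumbent, non-positive formable words never win,
-- so filtering them out (pB vs plain formability) does not change the first-extremum fold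
lemma mfold_skip (L : List String) (ls : List Char) (b : String) (hb : 0 < scoreB b) :
    mfold (some b) (L.filter (pB ls)) =
    mfold (some b) (L.filter (fun w => formableB (counterB ls) w)) := by
  induction L generalizing b with
  | nil => rfl
  | cons w rest ih =>
      simp only [List.filter_cons]
      by_cases hf : formableB (counterB ls) w = true
      · by_cases hs : (0:Int) < scoreB w
        · have hp : pB ls w = true := by
            unfold pB; rw [Bool.and_eq_true]; exact ⟨hf, by simpa using hs⟩
          simp only [hp, hf, if_pos, mfold, List.foldl_cons]
          by_cases hlt : scoreB b < scoreB w
          · simp only [hlt, if_pos]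
            exact ih w hs
          · simp only [hlt, if_neg, not_false_iff]
            exact ih b hb
        · have hp : pB ls w = false := by
            unfold pB
            simp only [Bool.and_eq_false_iff]; right
            simpa using hs
          simp only [hp, hf, Bool.false_eq_true, if_neg, not_false_iff, if_pos, mfold,
            List.foldl_cons]
          have hlt : ¬ scoreB b < scoreB w := by omega
          simp only [hlt, if_neg, not_false_iff]
          exact ih b hb
      · have hp : pB ls w = false := by
          unfold pB
          simp only [Bool.and_eq_false_iff]; left
          simpa using hf
        simp only [hp, hf, Bool.false_eq_true, if_neg, not_false_iff]
        exact ih b hb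

-- step 3b: starting from nothing (or a non-positive incumbent, which any positive word ousts),
-- the two filtered first-extremum folds agree as soon as some formable word scores positively
lemma mfold_main (L : List String) (ls : List Char) (o : Option String)
    (ho : ∀ z, o = some z → scoreB z ≤ 0)
    (hex : ∃ x ∈ L, formableB (counterB ls) x = true ∧ 0 < scoreB x) :
    mfold none (L.filter (pB ls)) =
    mfold o (L.filter (fun w => formableB (counterB ls) w)) := by
  induction L generalizing o with
  | nil => obtain ⟨x, hx, _⟩ := hex; cases hx
  | cons w rest ih =>
      simp only [List.filter_cons]
      by_cases hf : formableB (counterB ls) w = true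
      · by_cases hs : (0:Int) < scoreB w
        · have hp : pB ls w = true := by
            unfold pB; rw [Bool.and_eq_true]; exact ⟨hf, by simpa using hs⟩
          simp only [hp, hf, if_pos, mfold, List.foldl_cons]
          have hacc : (Option.rec (some w)
              (fun m => if scoreB m < scoreB w then some w else some m) o : Option String)
              = some w := by
            cases o with
            | none => rfl
            | some z =>
                have hz := ho z rfl
                have : scoreB z < scoreB w := by omega
                simp [this]
          cases o with
          | none => exact mfold_skip rest ls w hs
          | some z =>
              have hz := ho z rfl
              have hlt : scoreB z < scoreB w := by omega
              simp only [hlt, if_pos]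
              exact mfold_skip rest ls w hs
        · have hp : pB ls w = false := by
            unfold pB
            simp only [Bool.and_eq_false_iff]; right
            simpa using hs
          have hex' : ∃ x ∈ rest, formableB (counterB ls) x = true ∧ 0 < scoreB x := by
            obtain ⟨x, hx, h1, h2⟩ := hex
            rcases List.mem_cons.mp hx with h' | h'
            · subst h'; exact absurd h2 hs
            · exact ⟨x, h', h1, h2⟩
          simp only [hp, hf, Bool.false_eq_true, if_neg, not_false_iff, if_pos]
          cases o with
          | none =>
              show mfold none (rest.filter (pB ls)) = mfold (some w) _
              exact ih (some w) (by intro z hz; cases hz; omega) hex'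
          | some z =>
              have hz := ho z rfl
              show mfold none (rest.filter (pB ls)) =
                mfold (if scoreB z < scoreB w then some w else some z) _
              by_cases hlt : scoreB z < scoreB w
              · simp only [hlt, if_pos]
                exact ih (some w) (by intro y hy; cases hy; omega) hex'
              · simp only [hlt, if_neg, not_false_iff]
                exact ih (some z) (by intro y hy; cases hy; omega) hex'
      · have hp : pB ls w = false := by
          unfold pB
          simp only [Bool.and_eq_false_iff]; left
          simpa using hf
        have hex' : ∃ x ∈ rest, formableB (counterB ls) x = true ∧ 0 < scoreB x := by
          obtain ⟨x, hx, h1, h2⟩ := hex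
          rcases List.mem_cons.mp hx with h' | h'
          · rw [h'] at h1; exact absurd h1 hf
          · exact ⟨x, h', h1, h2⟩
        simp only [hp, hf, Bool.false_eq_true, if_neg, not_false_iff]
        exact ih o ho hex'

-- PySem's max? is the first-extremum fold mfold from none
lemma max?_eq_mfold (L : List String) :
    PySem.List.max? L scoreB = mfold none L := by
  simp only [PySem.List.max?, mfold]
  congr 1
  funext acc x
  cases acc <;> rfl

-- the two ports agree on every input admitted by Pre_
lemma ports_agree (aw : List String) (ls : String)
    (hpre : Pre_highest_score_dif aw ls) :
    highest_score_dif aw ls = highest_score_dif_alt aw ls := by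
  obtain ⟨hlc, hany⟩ := hpre
  -- the Pre_ witness: a nonempty formable word with positive score
  obtain ⟨x, hxmem, hx⟩ := List.any_eq_true.mp hany
  rw [Bool.and_eq_true] at hx
  obtain ⟨hxne, hxcnt⟩ := hx
  have hxform : formableB (counterB ls.toList) x = true := by
    rw [formableB_eq_count, decide_eq_true_eq]
    intro c hc
    exact of_decide_eq_true (List.all_eq_true.mp hxcnt c hc)
  have hxlc : x.toList.all (fun c => 'a' ≤ c && c ≤ 'z') = true :=
    List.all_eq_true.mp hlc x hxmem
  have hxpos : 0 < scoreB x := by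
    apply scoreB_pos x hxlc
    intro h
    rw [h] at hxne
    simp at hxne
  have hex : ∃ y ∈ aw, formableB (counterB ls.toList) y = true ∧ 0 < scoreB y :=
    ⟨x, hxmem, hxform, hxpos⟩
  unfold highest_score_dif highest_score_dif_alt
  dsimp only
  have h1 := foldA_proj aw ls 0 [] true
  have h2 := foldg_eq_max aw ls.toList none (by intro b hb; cases hb)
  have hst : ((0:Int), ([] : List String)) = stO none := rfl
  rw [hst, h2] at h1
  rw [mfold_main aw ls.toList none (by intro z hz; cases hz) hex] at h1
  have hfe : aw.filter (formableB (counterB ls.toList))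
      = aw.filter (fun w => formableB (counterB ls.toList) w) := rfl
  rw [max?_eq_mfold, hfe]
  cases hmax : mfold none (aw.filter (fun w => formableB (counterB ls.toList) w)) with
  | none =>
      exfalso
      obtain ⟨y, hy, hyf, _⟩ := hex
      have hyfil : y ∈ aw.filter (fun w => formableB (counterB ls.toList) w) :=
        List.mem_filter.mpr ⟨hy, hyf⟩
      have hmax' : PySem.List.max?
          (aw.filter (fun w => formableB (counterB ls.toList) w)) scoreB = none := by
        rw [max?_eq_mfold]; exact hmax
      rw [(PySem.List.max?_eq_none_iff _ _).mp hmax'] at hyfil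
      cases hyfil
  | some b =>
      rw [hmax] at h1
      have h12 := congrArg Prod.snd h1
      simp only [stO] at h12
      simp [h12, pyScore_eq]

-- ===== VERDICT (by name: the statement is the Claim_ definition above) =====
theorem highest_score_dif_spec : Claim_equal_highest_score_dif := by
  intro aw ls _ hpre
  unfold Spec_highest_score_dif
  exact ports_agree aw ls hpre
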